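-- pv_equiv track=rewrite | github.com/Veshek/US-B2-VisaRescheduler | VisaResheduler.py | isEarlier
-- ===== SOURCE A (Python) =====
-- def isEarlier(x: tuple[int, int, int], y: tuple[int, int, int], index: int = 0) -> bool:
--     if index > 2:
--         return False
--     elif x[index] > y[index]:
--         return False
--     elif x[index] < y[index]:
--         return True
--     else:
--         return isEarlier(x, y, index + 1)
-- ===== SOURCE B (Python) =====
-- def isEarlier(x: tuple[int, int, int], y: tuple[int, int, int], index: int = 0) -> bool:
--     for i in range(index, 3):
--         if x[i] > y[i]:
--             return False
--         if x[i] < y[i]: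
--             return True
--     return False
-- ===== Notes on version B (the rewrite author's own statement) =====
-- stated objective: idiomatic
-- what changed: Replaced A's recursion (threading index through recursive calls) by a single for-loop over range(index, 3) with early returns.
import Mathlib
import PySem

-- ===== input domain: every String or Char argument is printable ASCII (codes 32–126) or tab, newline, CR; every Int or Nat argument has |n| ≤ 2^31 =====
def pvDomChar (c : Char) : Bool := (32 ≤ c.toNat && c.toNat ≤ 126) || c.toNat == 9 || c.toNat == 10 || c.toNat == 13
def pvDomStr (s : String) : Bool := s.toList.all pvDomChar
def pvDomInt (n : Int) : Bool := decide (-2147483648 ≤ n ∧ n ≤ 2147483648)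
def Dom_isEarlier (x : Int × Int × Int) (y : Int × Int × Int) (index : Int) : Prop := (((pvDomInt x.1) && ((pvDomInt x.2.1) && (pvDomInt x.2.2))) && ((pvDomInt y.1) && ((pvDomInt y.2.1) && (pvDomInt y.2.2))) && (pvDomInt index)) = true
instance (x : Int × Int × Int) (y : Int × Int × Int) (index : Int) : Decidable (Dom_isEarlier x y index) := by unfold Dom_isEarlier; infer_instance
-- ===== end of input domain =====

-- B replaces A's recursion by a single for-loop over range(index, 3) with early returns (idiomatic; same cost).


-- ===== PORT A =====
-- t[i] on a 3-tuple with Python's negative-index rule; none = IndexError (excluded by Pre_)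
def tupGet? (t : Int × Int × Int) (i : Int) : Option Int :=
  if i = 0 ∨ i = -3 then some t.1
  else if i = 1 ∨ i = -2 then some t.2.1
  else if i = 2 ∨ i = -1 then some t.2.2
  else none

def isEarlier (x : Int × Int × Int) (y : Int × Int × Int) (index : Int) : Bool :=
  if _h : index > 2 then false
  else
    match tupGet? x index, tupGet? y index with
    | some a, some b =>
        if a > b then false
        else if a < b then true
        else isEarlier x y (index + 1)
    | _, _ => false   -- IndexError in Python; unreachable under Pre_
  termination_by (3 - index).toNat
  decreasing_by omega

-- ===== PORT B =====
-- t[i] on a 3-tuple with Python's negative-index rule; none = IndexError (excluded by Pre_)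
def altGet? (t : Int × Int × Int) (i : Int) : Option Int :=
  if i = 0 ∨ i = -3 then some t.1
  else if i = 1 ∨ i = -2 then some t.2.1
  else if i = 2 ∨ i = -1 then some t.2.2
  else none

-- one step of B's for-loop body; 'some r' = the loop already returned r
def altStep (x : Int × Int × Int) (y : Int × Int × Int) (st : Option Bool) (i : Int) : Option Bool :=
  match st with
  | some r => some r
  | none =>
      match altGet? x i with
      | none => some false   -- IndexError in Python; unreachable under Pre_
      | some a =>
          match altGet? y i with
          | none => some false   -- IndexError in Python; unreachable under Pre_
          | some b =>
              if a > b then some false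
              else if a < b then some true
              else none

def isEarlier_alt (x : Int × Int × Int) (y : Int × Int × Int) (index : Int) : Bool :=
  ((PySem.List.pyRange index 3 1).foldl (altStep x y) none).getD false

-- ===== PRECONDITION & SPEC =====
-- Pre_ excludes index < -3, where both Pythons raise IndexError on the first tuple access.
def Pre_isEarlier (x : Int × Int × Int) (y : Int × Int × Int) (index : Int) : Prop := -3 ≤ index
instance (x : Int × Int × Int) (y : Int × Int × Int) (index : Int) : Decidable (Pre_isEarlier x y index) := by unfold Pre_isEarlier; infer_instance
def pvWitness_isEarlier : (Int × Int × Int) × (Int × Int × Int) × Int := ((1, 2, 3), (1, 2, 4), 0)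

def Spec_isEarlier (x : Int × Int × Int) (y : Int × Int × Int) (index : Int) (out : Bool) : Prop := out = isEarlier_alt x y index
instance (x : Int × Int × Int) (y : Int × Int × Int) (index : Int) (out : Bool) : Decidable (Spec_isEarlier x y index out) := by unfold Spec_isEarlier; infer_instance

-- ===== CLAIM (what is proved, stated in full; the proofs are below) =====
def Claim_equal_isEarlier : Prop := ∀ (x : Int × Int × Int) (y : Int × Int × Int) (index : Int), Dom_isEarlier x y index → Pre_isEarlier x y index → Spec_isEarlier x y index (isEarlier x y index)

-- ===== LEMMAS AND PROOFS =====

lemma altGet?_eq_tupGet? (t : Int × Int × Int) (i : Int) : altGet? t i = tupGet? t i := rfl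

-- once B's loop has returned, later iterations change nothing
lemma foldl_altStep_some (x y : Int × Int × Int) (r : Bool) :
    ∀ (l : List Int), l.foldl (altStep x y) (some r) = some r := by
  intro l; induction l with
  | nil => rfl
  | cons i t ih => simpa [altStep] using ih

-- in-range indices hit a component
lemma tupGet?_isSome (t : Int × Int × Int) (i : Int) (h1 : -3 ≤ i) (h2 : i ≤ 2) :
    ∃ v, tupGet? t i = some v := by
  unfold tupGet?
  split_ifs <;> first | exact ⟨_, rfl⟩ | omega

lemma isEarlier_eq_alt (x y : Int × Int × Int) :
    ∀ (n : Nat) (index : Int), -3 ≤ index → (3 - index).toNat = n →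
      isEarlier x y index = isEarlier_alt x y index := by
  intro n
  induction n with
  | zero =>
      intro index _ hn
      have h3 : 3 ≤ index := by omega
      rw [isEarlier]
      simp only [isEarlier_alt, PySem.List.pyRange_one_eq_nil (by omega : (3:Int) ≤ index),
        List.foldl_nil, Option.getD_none]
      simp [show index > 2 by omega]
  | succ n ih =>
      intro index hlo hn
      have hub : index ≤ 2 := by omega
      obtain ⟨a, ha⟩ := tupGet?_isSome x index hlo hub
      obtain ⟨b, hb⟩ := tupGet?_isSome y index hlo hub
      rw [isEarlier]
      simp only [isEarlier_alt,
        PySem.List.pyRange_one_cons (by omega : index < 3), List.foldl_cons]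
      have hstep : altStep x y none index =
          (if a > b then some false else if a < b then some true else none) := by
        simp [altStep, altGet?_eq_tupGet?, ha, hb]
      simp only [show ¬ (index > 2) by omega, dif_neg, not_false_iff, ha, hb, hstep]
      by_cases hab : a > b
      · simp [hab, foldl_altStep_some]
      · by_cases hba : a < b
        · simp [hab, hba, foldl_altStep_some]
        · simp only [if_neg hab, if_neg hba]
          have := ih (index + 1) (by omega) (by omega)
          simpa [isEarlier_alt] using this

-- ===== VERDICT (by name: the statement is the Claim_ definition above) =====
theorem isEarlier_spec : Claim_equal_isEarlier := by
  intro x y index _ hpre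
  unfold Spec_isEarlier
  exact isEarlier_eq_alt x y (3 - index).toNat index hpre rfl
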